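/- GENERATED by farm/mkstatement.py from design/units.tsv (unit `prog_main.1`) and the assertions of Gif/Spec/Seg_prog_main.lean — do not edit.
   THE STATEMENT of the proof unit `prog_main.1`: segment 1 of `prog_main` (17 instructions; entries 0x105042;
   exits 0x105082; ranges 0x105042-0x105082)
   takes each of its entry assertions to one of its exit assertions (`Gif.Spec.prog_main.Seg1`), given the contracts of its callees.
   What the names mean: ProgX/Base/Spec/Basic.lean (the shared hypotheses), Gif/Spec/Seg_prog_main.lean (the assertions). The theorem to prove:
   `theorem prog_main_1_ok : Gif.Spec.prog_main_1.Statement`. -/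
import Gif.Code
import Gif.Dec.All
import Gif.Labels
import Gif.Spec.Driver
import Gif.Spec.Seg_prog_main
import ProgX.Base.Spec.Libc
namespace Gif.Spec.prog_main_1
open X86 X86.User Asan

/-- The statement of unit `prog_main.1`. -/
def Statement : Prop :=
  ∀ (Lay : Layout) (_hLay : Lay.hi = 0x1000000) (μ : Microarch) (_hμ : UserX.MicroOK μ) (u₀ : State)
    (_hcode : HasCodeNat Lay u₀ Gif.L.prog_main.entry Gif.Code.code_prog_main.nat Gif.L.prog_main.size)
    (_h_gif_decode : ∀ (H : Heap) (rest : List Obj) (frames : List (Nat × FrameLayout)), Calls Lay μ ProgX.Base.WayInv (ProgX.Base.conv u₀) Gif.L.gif_decode.entry (Gif.Spec.gif_decode.spec H rest frames))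
    (_h_memcpy : ∀ (others : List Obj) (frames : List (Nat × FrameLayout)), Calls Lay μ ProgX.Base.WayInv (ProgX.Base.conv u₀) ProgX.Base.L.memcpy.entry (ProgX.Base.Spec.memcpy.spec others frames)),
    Gif.Spec.prog_main.Seg1 Lay μ u₀

end Gif.Spec.prog_main_1
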